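-- pv_equiv track=rewrite | github.com/seppo0010/pdftomp3 | main.py | chunk_output
-- ===== SOURCE A (Python) =====
-- MAX_LENGTH = 20000
--
-- def chunk_output(output):
--     outputs = ['']
--     buf = ''
--     for line in output.split('\n'):
--         line = line.strip()
--         if len(line) == 0:
--             continue
--
--         if line[-1:] == '-':
--             buf = line[:-1]
--         else:
--             add = buf + line + ' '
--             if len(add + outputs[len(outputs)-1]) > MAX_LENGTH:
--                 outputs.append('')
--             outputs[len(outputs)-1] += add
--             buf = ''
--     return outputs
-- ===== SOURCE B (Python) =====
-- MAX_LENGTH = 20000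
--
-- def chunk_output(output):
--     # pass 1: join hyphenated line prefixes into whole tokens
--     tokens = []
--     buf = ''
--     for line in output.split('\n'):
--         line = line.strip()
--         if not line:
--             continue
--         if line.endswith('-'):
--             buf = line[:-1]
--         else:
--             tokens.append(buf + line + ' ')
--             buf = ''
--     # pass 2: greedily pack tokens into chunks of at most MAX_LENGTH
--     outputs = ['']
--     for token in tokens:
--         if len(token) + len(outputs[-1]) > MAX_LENGTH:
--             outputs.append('')
--         outputs[-1] += token
--     return outputs
-- ===== Notes on version B (the rewrite author's own statement) =====
-- stated objective: simpler
-- what changed: A's single loop that interleaves hyphen-joining with chunk packing is split into two plain passes: one builds the list of whole tokens (hyphen-joined lines), a second greedily packs them into chunks.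
import Mathlib
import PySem

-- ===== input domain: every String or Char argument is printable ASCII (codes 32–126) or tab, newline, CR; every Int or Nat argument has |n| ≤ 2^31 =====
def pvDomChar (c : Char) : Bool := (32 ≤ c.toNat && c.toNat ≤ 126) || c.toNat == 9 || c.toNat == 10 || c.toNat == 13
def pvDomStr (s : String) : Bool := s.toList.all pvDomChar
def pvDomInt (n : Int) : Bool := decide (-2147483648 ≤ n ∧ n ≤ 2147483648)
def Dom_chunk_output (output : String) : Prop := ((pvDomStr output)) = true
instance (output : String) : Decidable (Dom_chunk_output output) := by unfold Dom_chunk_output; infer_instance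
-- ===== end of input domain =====

-- B replaces A's single loop by two passes — hyphen-joining into tokens, then greedy packing —
-- which is a simpler decomposition of the same computation (objective: simpler; no speed claim).

-- ===== PORT A =====
-- one loop step of A: strip, skip empties, buffer hyphen lines, else pack buf+line+' ' into outputs.
-- State: (outputs, buf); strings kept as List Char (str concatenation and len are exact there).
def chunkStepA (st : List (List Char) × List Char) (line : List Char) :
    List (List Char) × List Char :=
  let l := PySem.Chars.strip line
  if l.length = 0 then st
  else if PySem.List.slice l (some (-1)) none = ['-'] then      -- line[-1:] == '-'
    (st.1, PySem.List.slice l none (some (-1)))                 -- buf = line[:-1]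
  else
    let add := st.2 ++ l ++ [' ']
    let last := st.1.getLastD []                                -- outputs[len(outputs)-1]
    if (add ++ last).length > 20000 then
      (st.1 ++ [add], [])     -- outputs.append(''); outputs[-1] += add
    else
      (st.1.dropLast ++ [last ++ add], [])                      -- outputs[-1] += add

def chunk_output (output : String) : List String :=
  (((PySem.Chars.splitOn output.toList ['\n']).foldl chunkStepA ([[]], [])).1).map String.ofList

-- ===== PORT B =====
-- pass 1 step: collect whole tokens (hyphen-joined lines, each with a trailing space)
def tokStepB (st : List (List Char) × List Char) (line : List Char) :
    List (List Char) × List Char :=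
  let l := PySem.Chars.strip line
  if l.length = 0 then st
  else if PySem.Chars.endswith l ['-'] then (st.1, l.dropLast)  -- buf = line[:-1]
  else (st.1 ++ [st.2 ++ l ++ [' ']], [])

-- pass 2 step: greedy packing of one token
def packStepB (outs : List (List Char)) (tok : List Char) : List (List Char) :=
  let outs' := if tok.length + (outs.getLastD []).length > 20000 then outs ++ [[]] else outs
  outs'.dropLast ++ [outs'.getLastD [] ++ tok]                  -- outputs[-1] += token

def chunk_output_alt (output : String) : List String :=
  let toks := ((PySem.Chars.splitOn output.toList ['\n']).foldl tokStepB ([], [])).1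
  ((toks.foldl packStepB [[]]).map String.ofList)

-- ===== PRECONDITION & SPEC =====
def Spec_chunk_output (output : String) (out : List String) : Prop := out = chunk_output_alt output
instance (output : String) (out : List String) : Decidable (Spec_chunk_output output out) := by unfold Spec_chunk_output; infer_instance

-- ===== CLAIM (what is proved, stated in full; the proofs are below) =====
def Claim_equal_chunk_output : Prop := ∀ (output : String), Dom_chunk_output output → Spec_chunk_output output (chunk_output output)

-- ===== LEMMAS AND PROOFS =====

-- tokens accumulate at the end regardless of the initial token list
theorem tok_accum (lines : List (List Char)) (ts : List (List Char)) (buf : List Char) :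
    (lines.foldl tokStepB (ts, buf)).1 = ts ++ (lines.foldl tokStepB ([], buf)).1 := by
  induction lines generalizing ts buf with
  | nil => simp
  | cons l ls ih =>
      simp only [List.foldl_cons, tokStepB]
      split
      · exact ih ts buf
      · split
        · exact ih ts _
        · simp only [List.nil_append]
          rw [ih (ts ++ [buf ++ PySem.Chars.strip l ++ [' ']]) [],
              ih [buf ++ PySem.Chars.strip l ++ [' ']] []]
          simp

-- A's in-loop packing of one token equals B's packStepB
theorem packStep_eq (outs : List (List Char)) (add : List Char) :
    (if (add ++ outs.getLastD []).length > 20000 then outs ++ [add]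
     else outs.dropLast ++ [outs.getLastD [] ++ add]) = packStepB outs add := by
  unfold packStepB
  simp only [List.length_append]
  split
  · simp
  · rfl

-- main invariant: A's loop from any state = packing the tokens B's first pass produces
theorem main_inv (lines : List (List Char)) (outs : List (List Char)) (buf : List Char) :
    ((lines.foldl chunkStepA (outs, buf)).1) =
      ((lines.foldl tokStepB ([], buf)).1).foldl packStepB outs := by
  induction lines generalizing outs buf with
  | nil => simp
  | cons l ls ih =>
      simp only [List.foldl_cons, chunkStepA, tokStepB]
      by_cases h0 : (PySem.Chars.strip l).length = 0
      · simp only [h0, if_true]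
        exact ih outs buf
      · have hne : PySem.Chars.strip l ≠ [] := by
          intro h; exact h0 (by simp [h])
        by_cases hh : PySem.List.slice (PySem.Chars.strip l) (some (-1)) none = ['-']
        · have hend : PySem.Chars.endswith (PySem.Chars.strip l) ['-'] = true := by
            rw [PySem.Chars.endswith_iff]
            rw [PySem.List.slice_from_neg_one] at hh
            have : PySem.Chars.strip l =
                (PySem.Chars.strip l).take ((PySem.Chars.strip l).length - 1) ++ ['-'] := by
              conv_lhs => rw [← List.take_append_drop ((PySem.Chars.strip l).length - 1)
                (PySem.Chars.strip l)]
              rw [hh]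
            exact ⟨_, this.symm⟩
          have hdrop : PySem.List.slice (PySem.Chars.strip l) none (some (-1)) =
              (PySem.Chars.strip l).dropLast := PySem.List.slice_to_neg_one _
          simp only [if_neg h0, if_pos hh, hend, if_true, hdrop]
          exact ih outs _
        · have hend : PySem.Chars.endswith (PySem.Chars.strip l) ['-'] = false := by
            by_contra hc
            have hc' : PySem.Chars.endswith (PySem.Chars.strip l) ['-'] = true := by
              revert hc; cases PySem.Chars.endswith (PySem.Chars.strip l) ['-'] <;> simp
            rw [PySem.Chars.endswith_iff] at hc'
            obtain ⟨t, ht⟩ := hc'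
            apply hh
            rw [PySem.List.slice_from_neg_one, ← ht]
            simp
          simp only [if_neg h0, if_neg hh, hend, Bool.false_eq_true, if_false,
            List.nil_append]
          rw [tok_accum ls [buf ++ PySem.Chars.strip l ++ [' ']] []]
          simp only [List.foldl_append, List.foldl_cons, List.foldl_nil]
          rw [← packStep_eq]
          split_ifs with hc
          · exact ih _ []
          · exact ih _ []

-- ===== VERDICT (by name: the statement is the Claim_ definition above) =====
theorem chunk_output_spec : Claim_equal_chunk_output := by
  intro output _
  unfold Spec_chunk_output chunk_output chunk_output_alt
  rw [main_inv]
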